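-- pv_equiv track=rewrite | github.com/MaxZdanoff/RubiksCubeSolver | Operations.py | simplify_moves
-- ===== SOURCE A (Python) =====
-- def simplify_moves(moves):
--     def move_to_tuple(move):
--         if move.endswith('2'):
--             return (move[0], 2)
--         elif move.startswith('-'):
--             return (move[1], -1)
--         else:
--             return (move[0], 1)
--
--     def tuple_to_move(face, count):
--         count %= 4
--         if count == 0:
--             return None
--         elif count == 1:
--             return face
--         elif count == 2:
--             return face + '2'
--         elif count == 3:
--             return '-' + face
--
--     stack = []
--
--     for move in moves:
--         face, count = move_to_tuple(move)
--         if stack and stack[-1][0] == face: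
--             prev_face, prev_count = stack.pop()
--             new_count = prev_count + count
--             simplified = tuple_to_move(face, new_count)
--             if simplified:
--                 stack.append(move_to_tuple(simplified))
--         else:
--             stack.append((face, count))
--
--     return [tuple_to_move(face, count) for face, count in stack if tuple_to_move(face, count)]
-- ===== SOURCE B (Python) =====
-- def simplify_moves(moves):
--     def parse(m):
--         if m.endswith('2'):
--             return (m[0], 2)
--         if m.startswith('-'):
--             return (m[1], 3)
--         return (m[0], 1)
--
--     def one_pass(ps):
--         out = []
--         i = 0
--         n = len(ps)
--         while i < n:
--             if i + 1 < n and ps[i][0] == ps[i + 1][0]: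
--                 c = (ps[i][1] + ps[i + 1][1]) % 4
--                 if c:
--                     out.append((ps[i][0], c))
--                 i += 2
--             else:
--                 out.append(ps[i])
--                 i += 1
--         return out
--
--     ps = [parse(m) for m in moves]
--     while True:
--         q = one_pass(ps)
--         if q == ps:
--             break
--         ps = q
--     return [f if c == 1 else f + '2' if c == 2 else '-' + f for f, c in ps]
-- ===== Notes on version B (the rewrite author's own statement) =====
-- stated objective: alternative
-- what changed: Replaces A's look-back stack with re-stringify-and-reparse inside the loop by: parse all moves to (face, count mod 4) pairs once, repeatedly merge disjoint adjacent same-face pairs in linear passes until a fixpoint, and emit canonical move strings only at the end.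
-- outside the precondition, e.g. on simplify_moves(['-2x', '-2x', '-2x']): A returns ['22'], B returns ['2']; on simplify_moves(['-2', '--x']): A raises IndexError, B returns ['-']
import Mathlib
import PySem

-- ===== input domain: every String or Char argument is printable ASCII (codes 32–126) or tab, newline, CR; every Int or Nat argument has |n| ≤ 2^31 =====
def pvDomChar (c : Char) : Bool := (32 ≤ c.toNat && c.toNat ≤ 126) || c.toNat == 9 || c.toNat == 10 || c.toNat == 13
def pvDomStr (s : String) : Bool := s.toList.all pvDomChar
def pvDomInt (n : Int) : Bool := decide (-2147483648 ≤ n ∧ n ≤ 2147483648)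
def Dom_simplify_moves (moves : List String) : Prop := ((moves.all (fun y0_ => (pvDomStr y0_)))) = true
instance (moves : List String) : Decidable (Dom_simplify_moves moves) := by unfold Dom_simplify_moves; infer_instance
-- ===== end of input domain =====

-- B replaces A's look-back stack (which re-stringifies and re-parses every merged move inside the
-- loop) by: parse once, iterate linear merge passes over adjacent same-face pairs to a fixpoint,
-- emit canonical strings at the end (objective: alternative; not claimed faster).

-- ===== PORT A =====
-- Python's 1-character string move[i] is represented as a Char; the `.getD ' '` default is the
-- IndexError case, unreachable under Pre_.
def pvMoveToTuple (move : String) : Char × Int :=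
  if PySem.Str.endswith move "2" then ((PySem.Str.pyGet? move 0).getD ' ', 2)
  else if PySem.Str.startswith move "-" then ((PySem.Str.pyGet? move 1).getD ' ', -1)
  else ((PySem.Str.pyGet? move 0).getD ' ', 1)

def pvTupleToMove (face : Char) (count : Int) : Option String :=
  let c := PySem.Int.mod count 4
  if c = 0 then none
  else if c = 1 then some (String.ofList [face])
  else if c = 2 then some (String.ofList [face, '2'])
  else some (String.ofList ['-', face])

def pvStepA (stack : List (Char × Int)) (move : String) : List (Char × Int) :=
  match stack.getLast? with
  | some pfc =>
    if pfc.1 = (pvMoveToTuple move).1 then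
      match pvTupleToMove (pvMoveToTuple move).1 (pfc.2 + (pvMoveToTuple move).2) with
      | some simplified => stack.dropLast ++ [pvMoveToTuple simplified]
      | none => stack.dropLast
    else stack ++ [pvMoveToTuple move]
  | none => stack ++ [pvMoveToTuple move]

def simplify_moves (moves : List String) : List String :=
  (moves.foldl pvStepA []).filterMap (fun fc => pvTupleToMove fc.1 fc.2)

-- ===== PORT B =====
def pvParse (m : String) : Char × Int :=
  if PySem.Str.endswith m "2" then ((PySem.Str.pyGet? m 0).getD ' ', 2)
  else if PySem.Str.startswith m "-" then ((PySem.Str.pyGet? m 1).getD ' ', 3)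
  else ((PySem.Str.pyGet? m 0).getD ' ', 1)

-- Source B's one_pass: the while loop advancing i by 2 on a merge and by 1 otherwise is this
-- two-at-a-time structural recursion.
def pvOnePass : List (Char × Int) → List (Char × Int)
  | [] => []
  | [p] => [p]
  | p :: q :: rest =>
    if p.1 = q.1 then
      (if PySem.Int.mod (p.2 + q.2) 4 = 0 then []
       else [(p.1, PySem.Int.mod (p.2 + q.2) 4)]) ++ pvOnePass rest
    else p :: pvOnePass (q :: rest)

-- needed by pvFix's decreasing_by
theorem pvOnePass_length_le (ps : List (Char × Int)) : (pvOnePass ps).length ≤ ps.length := by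
  induction ps using pvOnePass.induct with
  | case1 => simp [pvOnePass]
  | case2 p => simp [pvOnePass]
  | case3 p q rest hpq ih =>
    simp only [pvOnePass, if_pos hpq, List.length_append, List.length_cons]
    split <;> simp <;> omega
  | case4 p q rest hpq ih =>
    simp only [pvOnePass, if_neg hpq, List.length_cons]
    simp only [List.length_cons] at ih
    omega

theorem pvOnePass_length_lt (ps : List (Char × Int)) (h : pvOnePass ps ≠ ps) :
    (pvOnePass ps).length < ps.length := by
  induction ps using pvOnePass.induct with
  | case1 => simp [pvOnePass] at h
  | case2 p => simp [pvOnePass] at h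
  | case3 p q rest hpq ih =>
    have := pvOnePass_length_le rest
    simp only [pvOnePass, if_pos hpq, List.length_append, List.length_cons]
    split <;> simp <;> omega
  | case4 p q rest hpq ih =>
    simp only [pvOnePass, if_neg hpq] at h ⊢
    have h' : pvOnePass (q :: rest) ≠ q :: rest := by
      intro he; exact h (by rw [he])
    have := ih h'
    simp only [List.length_cons] at this ⊢
    omega

-- Source B's fixpoint while-loop
def pvFix (ps : List (Char × Int)) : List (Char × Int) :=
  if h : pvOnePass ps = ps then ps else pvFix (pvOnePass ps)
termination_by ps.length
decreasing_by exact pvOnePass_length_lt ps h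

def pvEmit (fc : Char × Int) : String :=
  if fc.2 = 1 then String.ofList [fc.1]
  else if fc.2 = 2 then String.ofList [fc.1, '2']
  else String.ofList ['-', fc.1]

def simplify_moves_alt (moves : List String) : List String :=
  (pvFix (moves.map pvParse)).map pvEmit

-- ===== PRECONDITION & SPEC =====
-- Pre_ excludes (a) moves on which A raises IndexError ('' and '-'; also inputs whose merge can
-- produce the bare move '-', via face '-' next to an equal face) and (b) degenerate tokens whose
-- face character is '2' or '-' adjacent to an equal face — outside cube-move syntax — on which A's
-- stringify-and-reparse of a merged move misreads the face or count (e.g. A turns three '-2x' into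
-- '22' where B gives '2').  Admitted: every move's face is neither '2' nor '-' (first disjunct), or
-- all moves parse and no two consecutive moves share a face, so no merge ever happens (second).
def pvPreMove (m : String) : Bool :=
  match (if PySem.Str.endswith m "2" then PySem.Str.pyGet? m 0
         else if PySem.Str.startswith m "-" then PySem.Str.pyGet? m 1
         else PySem.Str.pyGet? m 0) with
  | none => false
  | some c => !(c == '2' || c == '-')

def pvBasicMove (m : String) : Bool :=
  match (if PySem.Str.endswith m "2" then PySem.Str.pyGet? m 0
         else if PySem.Str.startswith m "-" then PySem.Str.pyGet? m 1
         else PySem.Str.pyGet? m 0) with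
  | none => false
  | some _ => true

def pvFaceChar (m : String) : Char :=
  if PySem.Str.endswith m "2" then (PySem.Str.pyGet? m 0).getD ' '
  else if PySem.Str.startswith m "-" then (PySem.Str.pyGet? m 1).getD ' '
  else (PySem.Str.pyGet? m 0).getD ' '

def pvAdjDistinct : List Char → Bool
  | [] => true
  | [_] => true
  | a :: b :: t => a != b && pvAdjDistinct (b :: t)

def Pre_simplify_moves (moves : List String) : Prop :=
  moves.all pvPreMove = true
  ∨ (moves.all pvBasicMove = true ∧ pvAdjDistinct (moves.map pvFaceChar) = true)
instance (moves : List String) : Decidable (Pre_simplify_moves moves) := by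
  unfold Pre_simplify_moves; infer_instance

def pvWitness_simplify_moves : List String := ["U", "U2", "-U", "F"]

def Spec_simplify_moves (moves : List String) (out : List String) : Prop := out = simplify_moves_alt moves
instance (moves : List String) (out : List String) : Decidable (Spec_simplify_moves moves out) := by unfold Spec_simplify_moves; infer_instance

-- ===== CLAIM (what is proved, stated in full; the proofs are below) =====
def Claim_equal_simplify_moves : Prop := ∀ (moves : List String), Dom_simplify_moves moves → Pre_simplify_moves moves → Spec_simplify_moves moves (simplify_moves moves)

-- ===== LEMMAS AND PROOFS =====

-- reversed-stack step (cons at the head); the proofs work in this world and map back by reverse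
def pvRStep (r : List (Char × Int)) (p : Char × Int) : List (Char × Int) :=
  match r with
  | [] => [p]
  | q :: r' =>
    if q.1 = p.1 then
      (if PySem.Int.mod (q.2 + p.2) 4 = 0 then r'
       else (p.1, PySem.Int.mod (q.2 + p.2) 4) :: r')
    else p :: q :: r'

theorem pvRStep_nil (p : Char × Int) : pvRStep [] p = [p] := rfl

theorem pvRStep_cons (q : Char × Int) (r' : List (Char × Int)) (p : Char × Int) :
    pvRStep (q :: r') p
      = (if q.1 = p.1 then
          (if PySem.Int.mod (q.2 + p.2) 4 = 0 then r'
           else (p.1, PySem.Int.mod (q.2 + p.2) 4) :: r')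
         else p :: q :: r') := rfl

theorem pvRStep_cons2 (g : Char) (b : Int) (r' : List (Char × Int)) (f : Char) (d : Int) :
    pvRStep ((g, b) :: r') (f, d)
      = (if g = f then
          (if PySem.Int.mod (b + d) 4 = 0 then r'
           else (f, PySem.Int.mod (b + d) 4) :: r')
         else (f, d) :: (g, b) :: r') := rfl

def pvToB (p : Char × Int) : Char × Int := (p.1, PySem.Int.mod p.2 4)

-- invariant of A's stack under Pre_
def pvOkA (p : Char × Int) : Prop := p.1 ≠ '2' ∧ p.1 ≠ '-' ∧ (p.2 = 1 ∨ p.2 = 2 ∨ p.2 = -1)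

-- counts B keeps
def pvOkC (c : Int) : Prop := c = 1 ∨ c = 2 ∨ c = 3

-- adjacent faces pairwise distinct
def pvDistinct : List (Char × Int) → Prop
  | [] => True
  | [_] => True
  | p :: q :: rest => p.1 ≠ q.1 ∧ pvDistinct (q :: rest)

-- normal form of the reversed stack
def pvNorm (r : List (Char × Int)) : Prop := pvDistinct r ∧ ∀ p ∈ r, pvOkC p.2

theorem pv_mod4 (a : Int) : PySem.Int.mod a 4 = a % 4 :=
  PySem.Int.mod_eq_emod_of_pos (by norm_num)

theorem pv_okC_bounds (c : Int) (h : pvOkC c) : 1 ≤ c ∧ c ≤ 3 := by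
  rcases h with rfl | rfl | rfl <;> norm_num

theorem pv_mod_okC (a b : Int) (ha : pvOkC a) (hb : pvOkC b)
    (hz : PySem.Int.mod (a + b) 4 ≠ 0) : pvOkC (PySem.Int.mod (a + b) 4) := by
  have h1 := pv_okC_bounds a ha
  have h2 := pv_okC_bounds b hb
  unfold pvOkC
  simp only [pv_mod4] at hz ⊢
  omega

theorem pv_parse_toB (m : String) : pvToB (pvMoveToTuple m) = pvParse m := by
  unfold pvToB pvMoveToTuple pvParse
  split_ifs <;> rfl

theorem pv_parse_ok (m : String) (h : pvPreMove m = true) :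
    (pvParse m).1 ≠ '2' ∧ (pvParse m).1 ≠ '-' ∧ pvOkC (pvParse m).2 := by
  unfold pvPreMove at h
  unfold pvParse pvOkC
  split_ifs at h ⊢ <;>
    [cases hg : PySem.Str.pyGet? m 0; cases hg : PySem.Str.pyGet? m 1;
     cases hg : PySem.Str.pyGet? m 0] <;>
    rw [hg] at h <;> simp_all

theorem pv_moveToTuple_okA (m : String) (h : pvPreMove m = true) : pvOkA (pvMoveToTuple m) := by
  unfold pvPreMove at h
  unfold pvMoveToTuple pvOkA
  split_ifs at h ⊢ <;>
    [cases hg : PySem.Str.pyGet? m 0; cases hg : PySem.Str.pyGet? m 1;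
     cases hg : PySem.Str.pyGet? m 0] <;>
    rw [hg] at h <;> simp_all

theorem pv_roundtrip (f : Char) (x k : Int) (h2 : f ≠ '2') (hmi : f ≠ '-')
    (hk : PySem.Int.mod x 4 = k) (hk123 : k = 1 ∨ k = 2 ∨ k = 3) :
    pvTupleToMove f x = some (pvEmit (f, k))
    ∧ pvMoveToTuple (pvEmit (f, k)) = (f, if k = 3 then -1 else k) := by
  have t2 : ("2" : String).toList = ['2'] := by decide
  have tm : ("-" : String).toList = ['-'] := by decide
  have hE1 : PySem.Chars.endswith [f] ['2'] = false := by
    rw [Bool.eq_false_iff]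
    intro hcon
    rw [PySem.Chars.endswith_iff] at hcon
    rcases List.suffix_cons_iff.mp hcon with h' | h'
    · exact h2 (List.cons_eq_cons.mp h').1.symm
    · simp at h'
  have hE2 : PySem.Chars.endswith [f, '2'] ['2'] = true := by
    rw [PySem.Chars.endswith_iff]
    exact ⟨[f], rfl⟩
  have hE3 : PySem.Chars.endswith ['-', f] ['2'] = false := by
    rw [Bool.eq_false_iff]
    intro hcon
    rw [PySem.Chars.endswith_iff] at hcon
    rcases List.suffix_cons_iff.mp hcon with h' | h'
    · simp at h'
    · rcases List.suffix_cons_iff.mp h' with h'' | h''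
      · exact h2 (List.cons_eq_cons.mp h'').1.symm
      · simp at h''
  have hS1 : PySem.Chars.startswith [f] ['-'] = false := by
    rw [Bool.eq_false_iff]
    intro hcon
    rw [PySem.Chars.startswith_iff] at hcon
    rw [List.cons_prefix_cons] at hcon
    exact hmi hcon.1.symm
  have hS3 : PySem.Chars.startswith ['-', f] ['-'] = true := by
    rw [PySem.Chars.startswith_iff]
    rw [List.cons_prefix_cons]
    exact ⟨rfl, by simp⟩
  rcases hk123 with rfl | rfl | rfl
  · refine ⟨?_, ?_⟩
    · simp only [pvTupleToMove]
      rw [hk]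
      norm_num [pvEmit]
    · have he : pvEmit (f, 1) = String.ofList [f] := by norm_num [pvEmit]
      rw [he]
      unfold pvMoveToTuple
      simp [t2, tm, hE1, hS1]
  · refine ⟨?_, ?_⟩
    · simp only [pvTupleToMove]
      rw [hk]
      norm_num [pvEmit]
    · have he : pvEmit (f, 2) = String.ofList [f, '2'] := by norm_num [pvEmit]
      rw [he]
      unfold pvMoveToTuple
      simp [t2, hE2]
  · refine ⟨?_, ?_⟩
    · simp only [pvTupleToMove]
      rw [hk]
      norm_num [pvEmit]
    · have he : pvEmit (f, 3) = String.ofList ['-', f] := by norm_num [pvEmit]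
      rw [he]
      unfold pvMoveToTuple
      simp [t2, tm, hE3, hS3]

theorem pv_stepA_r (s : List (Char × Int)) (m : String) (hm : pvPreMove m = true)
    (hs : ∀ p ∈ s, pvOkA p) :
    ((pvStepA s m).map pvToB).reverse = pvRStep ((s.map pvToB).reverse) (pvParse m)
    ∧ ∀ p ∈ pvStepA s m, pvOkA p := by
  have htb := pv_parse_toB m
  have hokm := pv_moveToTuple_okA m hm
  have hfk : (pvMoveToTuple m).1 = (pvParse m).1 := by rw [← htb]; rfl
  have hck : PySem.Int.mod (pvMoveToTuple m).2 4 = (pvParse m).2 := by rw [← htb]; rfl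
  rcases List.eq_nil_or_concat s with rfl | ⟨s', a, rfl⟩
  · refine ⟨?_, ?_⟩
    · simp [pvStepA, pvRStep, htb]
    · intro p hp'
      simp [pvStepA] at hp'
      rw [hp']
      exact hokm
  · simp only [List.concat_eq_append] at hs ⊢
    have hlast : (s' ++ [a]).getLast? = some a := List.getLast?_concat
    have hoka : pvOkA a := hs a (by simp)
    have hos' : ∀ p ∈ s', pvOkA p := fun p hp' => hs p (by simp [hp'])
    have hrev : ((s' ++ [a]).map pvToB).reverse = pvToB a :: (s'.map pvToB).reverse := by simp
    by_cases hface : a.1 = (pvMoveToTuple m).1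
    · have hcF : (pvToB a).1 = (pvParse m).1 := by
        show a.1 = (pvParse m).1
        rw [← hfk]
        exact hface
      have hAe : pvStepA (s' ++ [a]) m
          = (match pvTupleToMove (pvMoveToTuple m).1 (a.2 + (pvMoveToTuple m).2) with
             | some simplified => s' ++ [pvMoveToTuple simplified]
             | none => s') := by
        simp [pvStepA, hlast, hface]
      have hkB : PySem.Int.mod ((pvToB a).2 + (pvParse m).2) 4
          = PySem.Int.mod (a.2 + (pvMoveToTuple m).2) 4 := by
        show PySem.Int.mod (PySem.Int.mod a.2 4 + (pvParse m).2) 4 = _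
        rw [← hck]
        simp only [pv_mod4]
        omega
      by_cases hz : PySem.Int.mod (a.2 + (pvMoveToTuple m).2) 4 = 0
      · have hT : pvTupleToMove (pvMoveToTuple m).1 (a.2 + (pvMoveToTuple m).2) = none := by
          simp only [pvTupleToMove]
          rw [if_pos hz]
        rw [hAe, hT]
        refine ⟨?_, hos'⟩
        rw [hrev, pvRStep_cons, if_pos hcF, if_pos (by rw [hkB]; exact hz)]
      · obtain ⟨k, hkdef⟩ : ∃ k, PySem.Int.mod (a.2 + (pvMoveToTuple m).2) 4 = k := ⟨_, rfl⟩
        have hk123 : k = 1 ∨ k = 2 ∨ k = 3 := by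
          rw [← hkdef]
          rw [pv_mod4] at hz ⊢
          omega
        have hzk : ¬ k = 0 := by rw [← hkdef]; exact hz
        have hkB' : PySem.Int.mod ((pvToB a).2 + (pvParse m).2) 4 = k := by rw [hkB, hkdef]
        obtain ⟨hT, hRT⟩ := pv_roundtrip (pvMoveToTuple m).1 (a.2 + (pvMoveToTuple m).2) k
          hokm.1 hokm.2.1 hkdef hk123
        rw [hAe, hT]
        refine ⟨?_, ?_⟩
        · simp only [List.map_append, List.map_cons, List.map_nil, List.reverse_append,
            List.reverse_cons, List.reverse_nil, List.nil_append, List.cons_append, hRT]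
          have hTB : pvToB ((pvMoveToTuple m).1, if k = 3 then -1 else k) = ((pvParse m).1, k) := by
            rcases hk123 with rfl | rfl | rfl
            · exact Prod.ext_iff.mpr ⟨hfk, by show PySem.Int.mod (1 : Int) 4 = 1; decide⟩
            · exact Prod.ext_iff.mpr ⟨hfk, by show PySem.Int.mod (2 : Int) 4 = 2; decide⟩
            · exact Prod.ext_iff.mpr ⟨hfk, by show PySem.Int.mod (-1 : Int) 4 = 3; decide⟩
          rw [hTB, pvRStep_cons, if_pos hcF, hkB', if_neg hzk]
        · intro p hp'
          rcases List.mem_append.mp hp' with h' | h'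
          · exact hos' p h'
          · simp at h'
            rw [h', hRT]
            refine ⟨hokm.1, hokm.2.1, ?_⟩
            rcases hk123 with rfl | rfl | rfl <;> simp
    · have hAe : pvStepA (s' ++ [a]) m = (s' ++ [a]) ++ [pvMoveToTuple m] := by
        simp [pvStepA, hlast, hface]
      rw [hAe]
      refine ⟨?_, ?_⟩
      · simp only [List.map_append, List.map_cons, List.map_nil, List.reverse_append,
          List.reverse_cons, List.reverse_nil, List.nil_append, List.cons_append, htb]
        rw [pvRStep_cons, if_neg (by show ¬ a.1 = (pvParse m).1; rw [← hfk]; exact hface)]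
      · intro p hp'
        rcases List.mem_append.mp hp' with h' | h'
        · exact hs p h'
        · simp at h'
          rw [h']
          exact hokm

theorem pv_foldA (moves : List String) (s : List (Char × Int))
    (hm : ∀ m ∈ moves, pvPreMove m = true) (hs : ∀ p ∈ s, pvOkA p) :
    ((moves.foldl pvStepA s).map pvToB).reverse
      = (moves.map pvParse).foldl pvRStep ((s.map pvToB).reverse)
    ∧ ∀ p ∈ moves.foldl pvStepA s, pvOkA p := by
  induction moves generalizing s with
  | nil => exact ⟨rfl, hs⟩
  | cons m ms ih =>
    obtain ⟨h1, h2⟩ := pv_stepA_r s m (hm m List.mem_cons_self) hs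
    obtain ⟨ih1, ih2⟩ := ih (pvStepA s m) (fun x hx => hm x (List.mem_cons_of_mem m hx)) h2
    refine ⟨?_, ih2⟩
    simp only [List.foldl_cons, List.map_cons]
    rw [ih1, h1]

theorem pv_emit (s : List (Char × Int)) (hs : ∀ p ∈ s, pvOkA p) :
    s.filterMap (fun fc => pvTupleToMove fc.1 fc.2) = (s.map pvToB).map pvEmit := by
  induction s with
  | nil => rfl
  | cons p rest ih =>
    have hp := hs p List.mem_cons_self
    have hk123 : PySem.Int.mod p.2 4 = 1 ∨ PySem.Int.mod p.2 4 = 2 ∨ PySem.Int.mod p.2 4 = 3 := by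
      rcases hp.2.2 with h | h | h <;> rw [h] <;> decide
    obtain ⟨hT, _⟩ := pv_roundtrip p.1 p.2 (PySem.Int.mod p.2 4) hp.1 hp.2.1 rfl hk123
    simp only [List.filterMap_cons, List.map_cons, hT]
    rw [ih (fun x hx => hs x (List.mem_cons_of_mem p hx))]
    rfl

theorem pv_distinct_tail (a : Char × Int) (l : List (Char × Int)) (h : pvDistinct (a :: l)) :
    pvDistinct l := by
  cases l with
  | nil => trivial
  | cons b t => exact h.2

theorem pv_rstep_norm (r : List (Char × Int)) (p : Char × Int) (hr : pvNorm r) (hp : pvOkC p.2) :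
    pvNorm (pvRStep r p) := by
  obtain ⟨hd, hc⟩ := hr
  cases r with
  | nil =>
    rw [pvRStep_nil]
    exact ⟨trivial, by simpa using hp⟩
  | cons q r' =>
    rw [pvRStep_cons]
    by_cases hq : q.1 = p.1
    · rw [if_pos hq]
      by_cases hz : PySem.Int.mod (q.2 + p.2) 4 = 0
      · rw [if_pos hz]
        exact ⟨pv_distinct_tail q r' hd, fun x hx => hc x (List.mem_cons_of_mem q hx)⟩
      · rw [if_neg hz]
        refine ⟨?_, ?_⟩
        · cases r' with
          | nil => trivial
          | cons b t =>
            refine ⟨?_, pv_distinct_tail q (b :: t) hd⟩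
            show p.1 ≠ b.1
            rw [← hq]
            exact hd.1
        · intro x hx
          rcases List.mem_cons.mp hx with rfl | hx'
          · exact pv_mod_okC q.2 p.2 (hc q List.mem_cons_self) hp hz
          · exact hc x (List.mem_cons_of_mem q hx')
    · rw [if_neg hq]
      refine ⟨⟨fun he => hq he.symm, hd⟩, ?_⟩
      intro x hx
      rcases List.mem_cons.mp hx with rfl | hx'
      · exact hp
      · exact hc x hx'

theorem pv_collapse (r : List (Char × Int)) (f : Char) (c d : Int)
    (hr : pvNorm r) (hc : pvOkC c) (hd : pvOkC d) :
    pvRStep (pvRStep r (f, c)) (f, d)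
      = (if PySem.Int.mod (c + d) 4 = 0 then r
         else pvRStep r (f, PySem.Int.mod (c + d) 4)) := by
  obtain ⟨hdist, hcnt⟩ := hr
  have hcb := pv_okC_bounds c hc
  have hdb := pv_okC_bounds d hd
  cases r with
  | nil =>
    rw [pvRStep_nil, pvRStep_cons2, if_pos rfl]
    split_ifs with h0
    · rfl
    · rw [pvRStep_nil]
  | cons q r' =>
    obtain ⟨g, b⟩ := q
    have hqb : 1 ≤ b ∧ b ≤ 3 := pv_okC_bounds b (hcnt (g, b) List.mem_cons_self)
    by_cases hg : g = f
    · rw [pvRStep_cons2, if_pos hg]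
      by_cases hz1 : PySem.Int.mod (b + c) 4 = 0
      · rw [if_pos hz1]
        have hLHS : pvRStep r' (f, d) = (f, d) :: r' := by
          cases r' with
          | nil => rw [pvRStep_nil]
          | cons qq t =>
            obtain ⟨g2, b2⟩ := qq
            have hg2 : g2 ≠ f := fun he => hdist.1 (hg.trans he.symm)
            rw [pvRStep_cons2, if_neg hg2]
        rw [hLHS]
        split_ifs with he
        · have hbd : b = d := by
            simp only [pv_mod4] at hz1 he
            omega
          rw [hbd, ← hg]
        · rw [pvRStep_cons2, if_pos hg]
          have hbd' : PySem.Int.mod (b + PySem.Int.mod (c + d) 4) 4 = d := by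
            simp only [pv_mod4] at hz1 he ⊢
            omega
          rw [if_neg (by rw [hbd']; omega), hbd']
      · rw [if_neg hz1]
        rw [pvRStep_cons2, if_pos rfl]
        split_ifs with hz2 he he
        · exfalso
          simp only [pv_mod4] at hz1 hz2 he
          omega
        · rw [pvRStep_cons2, if_pos hg, if_pos]
          simp only [pv_mod4] at hz2 ⊢
          omega
        · have hv : PySem.Int.mod (PySem.Int.mod (b + c) 4 + d) 4 = b := by
            simp only [pv_mod4] at hz1 he ⊢
            omega
          rw [hv, ← hg]
        · have hvv : PySem.Int.mod (PySem.Int.mod (b + c) 4 + d) 4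
              = PySem.Int.mod (b + PySem.Int.mod (c + d) 4) 4 := by
            simp only [pv_mod4]
            omega
          have hnz : ¬ PySem.Int.mod (b + PySem.Int.mod (c + d) 4) 4 = 0 := by
            rw [← hvv]
            exact hz2
          rw [pvRStep_cons2, if_pos hg, hvv, if_neg hnz]
    · rw [pvRStep_cons2, if_neg hg]
      rw [pvRStep_cons2, if_pos rfl]
      split_ifs with he
      · rfl
      · rw [pvRStep_cons2, if_neg hg]

theorem pv_onePass_okC (ps : List (Char × Int)) (h : ∀ p ∈ ps, pvOkC p.2) :
    ∀ p ∈ pvOnePass ps, pvOkC p.2 := by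
  induction ps using pvOnePass.induct with
  | case1 => simpa [pvOnePass] using h
  | case2 p => simpa [pvOnePass] using h
  | case3 p q rest hpq ih =>
    have hrest : ∀ x ∈ rest, pvOkC x.2 := fun x hx => h x (by simp [hx])
    intro x hx
    simp only [pvOnePass, if_pos hpq] at hx
    rcases List.mem_append.mp hx with h' | h'
    · split_ifs at h' with hz
      · exact absurd h' List.not_mem_nil
      · rw [List.mem_singleton] at h'
        rw [h']
        exact pv_mod_okC p.2 q.2 (h p List.mem_cons_self) (h q (by simp)) hz
    · exact ih hrest x h'
  | case4 p q rest hpq ih =>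
    intro x hx
    simp only [pvOnePass, if_neg hpq] at hx
    rcases List.mem_cons.mp hx with rfl | h'
    · exact h x List.mem_cons_self
    · exact ih (fun y hy => h y (List.mem_cons_of_mem p hy)) x h'

theorem pv_foldl_onePass (ps : List (Char × Int)) :
    (∀ p ∈ ps, pvOkC p.2) → ∀ r, pvNorm r →
    (pvOnePass ps).foldl pvRStep r = ps.foldl pvRStep r := by
  induction ps using pvOnePass.induct with
  | case1 => intro _ r _; rfl
  | case2 p => intro _ r _; rfl
  | case3 p q rest hpq ih =>
    intro hok r hr
    have hpc : pvOkC p.2 := hok p List.mem_cons_self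
    have hqc : pvOkC q.2 := hok q (by simp)
    have hrest : ∀ x ∈ rest, pvOkC x.2 := fun x hx => hok x (by simp [hx])
    simp only [pvOnePass, if_pos hpq, List.foldl_append, List.foldl_cons]
    have hcol := pv_collapse r p.1 p.2 q.2 ⟨hr.1, hr.2⟩ hpc hqc
    have hpe : ((p.1, p.2) : Char × Int) = p := rfl
    have hqe : ((p.1, q.2) : Char × Int) = q := by
      rcases q with ⟨q1, q2⟩
      rw [Prod.mk.injEq]
      exact ⟨hpq, rfl⟩
    rw [hpe, hqe] at hcol
    split_ifs at hcol ⊢ with hz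
    · rw [List.foldl_nil, ih hrest r hr, hcol]
    · have hnorm : pvNorm (pvRStep r (p.1, PySem.Int.mod (p.2 + q.2) 4)) :=
        pv_rstep_norm r _ hr (pv_mod_okC p.2 q.2 hpc hqc hz)
      simp only [List.foldl_cons, List.foldl_nil]
      rw [ih hrest _ hnorm, hcol]
  | case4 p q rest hpq ih =>
    intro hok r hr
    have hpc : pvOkC p.2 := hok p List.mem_cons_self
    simp only [pvOnePass, if_neg hpq, List.foldl_cons]
    exact ih (fun y hy => hok y (List.mem_cons_of_mem p hy)) (pvRStep r p)
      (pv_rstep_norm r p hr hpc)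

theorem pv_fix_chain (ps : List (Char × Int)) (h : pvOnePass ps = ps) : pvDistinct ps := by
  induction ps using pvOnePass.induct with
  | case1 => trivial
  | case2 p => trivial
  | case3 p q rest hpq ih =>
    exfalso
    have hle := pvOnePass_length_le rest
    have hlen := congrArg List.length h
    simp only [pvOnePass, if_pos hpq, List.length_append, List.length_cons] at hlen
    split_ifs at hlen <;> simp at hlen <;> omega
  | case4 p q rest hpq ih =>
    simp only [pvOnePass, if_neg hpq] at h
    have htail : pvOnePass (q :: rest) = q :: rest := (List.cons_eq_cons.mp h).2
    exact ⟨hpq, ih htail⟩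

theorem pv_nf_fold (ps : List (Char × Int)) :
    pvDistinct ps → ∀ r, (∀ b, ps.head? = some b → ∀ a, r.head? = some a → a.1 ≠ b.1) →
    ps.foldl pvRStep r = ps.reverse ++ r := by
  induction ps with
  | nil => intro _ r _; simp
  | cons p rest ih =>
    intro hdist r hh
    have hstep : pvRStep r p = p :: r := by
      cases r with
      | nil => rw [pvRStep_nil]
      | cons a r' =>
        rw [pvRStep_cons, if_neg (hh p rfl a rfl)]
    simp only [List.foldl_cons, hstep]
    rw [ih (pv_distinct_tail p rest hdist) (p :: r) ?_]
    · simp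
    · intro b hb a ha
      cases rest with
      | nil => simp at hb
      | cons b' t =>
        simp at hb ha
        rw [← ha, ← hb]
        exact hdist.1

theorem pv_fix_eq (ps : List (Char × Int)) :
    (∀ p ∈ ps, pvOkC p.2) → pvFix ps = (ps.foldl pvRStep []).reverse := by
  induction ps using pvFix.induct with
  | case1 ps h =>
    intro hok
    rw [pvFix, dif_pos h]
    rw [pv_nf_fold ps (pv_fix_chain ps h) [] (by intro b _ a ha; simp at ha)]
    simp
  | case2 ps h ih =>
    intro hok
    rw [pvFix, dif_neg h]
    rw [ih (pv_onePass_okC ps hok)]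
    rw [pv_foldl_onePass ps hok [] ⟨trivial, by simp⟩]

theorem pv_face_eqA (m : String) : pvFaceChar m = (pvMoveToTuple m).1 := by
  unfold pvFaceChar pvMoveToTuple
  split_ifs <;> rfl

theorem pv_face_eqB (m : String) : pvFaceChar m = (pvParse m).1 := by
  unfold pvFaceChar pvParse
  split_ifs <;> rfl

theorem pv_adjD_tail (a : Char) (l : List Char) (h : pvAdjDistinct (a :: l) = true) :
    pvAdjDistinct l = true := by
  cases l with
  | nil => rfl
  | cons b t =>
    simp only [pvAdjDistinct, Bool.and_eq_true] at h
    exact h.2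

theorem pv_adjD_head (a b : Char) (l : List Char) (h : pvAdjDistinct (a :: b :: l) = true) :
    a ≠ b := by
  simp only [pvAdjDistinct, Bool.and_eq_true, bne_iff_ne] at h
  exact h.1

theorem pvStepA_last_none (s : List (Char × Int)) (m : String) (h : s.getLast? = none) :
    pvStepA s m = s ++ [pvMoveToTuple m] := by
  unfold pvStepA
  rw [h]

theorem pvStepA_last_ne (s : List (Char × Int)) (m : String) (x : Char × Int)
    (h : s.getLast? = some x) (hne : ¬ x.1 = (pvMoveToTuple m).1) :
    pvStepA s m = s ++ [pvMoveToTuple m] := by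
  unfold pvStepA
  rw [h]
  exact if_neg hne

theorem pv_noMerge (moves : List String) : ∀ s : List (Char × Int),
    pvAdjDistinct (moves.map pvFaceChar) = true →
    (∀ x, s.getLast? = some x → ∀ h0, moves.head? = some h0 → x.1 ≠ pvFaceChar h0) →
    moves.foldl pvStepA s = s ++ moves.map pvMoveToTuple := by
  induction moves with
  | nil => intro s _ _; simp
  | cons m ms ih =>
    intro s hadj hlast
    have hstep : pvStepA s m = s ++ [pvMoveToTuple m] := by
      cases hgl : s.getLast? with
      | none => exact pvStepA_last_none s m hgl
      | some x =>
        refine pvStepA_last_ne s m x hgl ?_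
        have := hlast x hgl m rfl
        rw [pv_face_eqA] at this
        exact this
    simp only [List.foldl_cons, hstep, List.map_cons]
    rw [ih (s ++ [pvMoveToTuple m]) (by rw [List.map_cons] at hadj; exact pv_adjD_tail _ _ hadj) ?_]
    · simp
    · intro x hx h0 hh0
      rw [List.getLast?_concat] at hx
      obtain rfl := Option.some.inj hx
      cases ms with
      | nil => simp at hh0
      | cons m2 t =>
        obtain rfl : m2 = h0 := by simpa using hh0
        rw [← pv_face_eqA]
        simp only [List.map_cons] at hadj
        exact pv_adjD_head _ _ _ hadj

theorem pv_onePass_id (ps : List (Char × Int)) (h : pvDistinct ps) : pvOnePass ps = ps := by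
  induction ps using pvOnePass.induct with
  | case1 => rfl
  | case2 p => rfl
  | case3 p q rest hpq ih => exact absurd hpq h.1
  | case4 p q rest hpq ih =>
    simp only [pvOnePass, if_neg hpq]
    rw [ih h.2]

theorem pv_adj_parse (moves : List String)
    (h : pvAdjDistinct (moves.map pvFaceChar) = true) : pvDistinct (moves.map pvParse) := by
  induction moves with
  | nil => trivial
  | cons m ms ih =>
    cases ms with
    | nil => trivial
    | cons m2 t =>
      simp only [List.map_cons] at h ⊢
      refine ⟨?_, ?_⟩
      · show (pvParse m).1 ≠ (pvParse m2).1
        rw [← pv_face_eqB, ← pv_face_eqB]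
        exact pv_adjD_head _ _ _ h
      · have := ih (by simpa only [List.map_cons] using pv_adjD_tail _ _ h)
        simpa only [List.map_cons] using this

theorem pv_emit_elem (m : String) :
    pvTupleToMove (pvMoveToTuple m).1 (pvMoveToTuple m).2 = some (pvEmit (pvParse m)) := by
  unfold pvMoveToTuple pvParse pvTupleToMove pvEmit
  split_ifs <;> simp_all

theorem pv_filterMap_noMerge (moves : List String) :
    (moves.map pvMoveToTuple).filterMap (fun fc => pvTupleToMove fc.1 fc.2)
      = (moves.map pvParse).map pvEmit := by
  induction moves with
  | nil => rfl
  | cons m ms ih =>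
    simp only [List.map_cons, List.filterMap_cons, pv_emit_elem m]
    rw [ih]

-- ===== VERDICT (by name: the statement is the Claim_ definition above) =====
theorem simplify_moves_spec : Claim_equal_simplify_moves := by
  intro moves _hdom hpre
  unfold Spec_simplify_moves
  rcases hpre with hpre | ⟨_hbasic, hadj⟩
  · have hm : ∀ m ∈ moves, pvPreMove m = true := by
      intro m hmem
      simpa using List.all_eq_true.mp hpre m hmem
    obtain ⟨hfold, hok⟩ := pv_foldA moves [] hm (by simp)
    simp only [List.map_nil, List.reverse_nil] at hfold
    have hparse_ok : ∀ p ∈ moves.map pvParse, pvOkC p.2 := by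
      intro p hp
      obtain ⟨m, hmem, rfl⟩ := List.mem_map.mp hp
      exact (pv_parse_ok m (hm m hmem)).2.2
    unfold simplify_moves simplify_moves_alt
    rw [pv_emit _ hok, pv_fix_eq _ hparse_ok, ← hfold, List.reverse_reverse]
  · unfold simplify_moves simplify_moves_alt
    rw [pv_noMerge moves [] hadj (by intro x hx; simp at hx)]
    rw [pvFix, dif_pos (pv_onePass_id _ (pv_adj_parse moves hadj))]
    simp only [List.nil_append]
    exact pv_filterMap_noMerge moves
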